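-- pv_equiv track=rewrite | github.com/amaslovskyi/talos-chatbot | src/github_crawler.py | _filter_documentation_files
-- ===== SOURCE A (Python) =====
-- from typing import List, Dict, Any, Optional, Tuple, Set
--
-- def _filter_documentation_files(
--     all_files: List[str], query: str
-- ) -> List[str]:
--     """Filter files to focus on documentation and relevant content."""
--     doc_files = []
--     query_lower = query.lower()
--
--     # Define file extensions and patterns for documentation
--     doc_extensions = [".md", ".txt", ".rst", ".adoc", ".asciidoc", ".org", ".wiki"]
--     doc_patterns = [
--         "readme",
--         "install",
--         "build",
--         "setup",
--         "config",
--         "upgrade",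
--         "migration",
--         "tutorial",
--         "guide",
--         "manual",
--         "howto",
--         "faq",
--         "changelog",
--         "changes",
--         "news",
--         "release",
--         "todo",
--         "bug",
--         "plugin",
--         "module",
--         "component",
--         "api",
--         "usage",
--         "example",
--     ]
--
--     # Query-specific patterns
--     query_patterns = []
--     if any(term in query_lower for term in ["upgrade", "migration", "update"]):
--         query_patterns.extend(
--             ["upgrade", "migration", "changelog", "changes", "release"]
--         )
--     if any(term in query_lower for term in ["plugin", "plugins", "module"]):
--         query_patterns.extend(["plugin", "module", "component", "extension"])
--     if any(term in query_lower for term in ["install", "build", "setup"]):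
--         query_patterns.extend(["install", "build", "setup", "configure", "compile"])
--     if any(term in query_lower for term in ["usage", "how", "tutorial"]):
--         query_patterns.extend(["usage", "tutorial", "guide", "example", "howto"])
--
--     for file_path in all_files:
--         file_lower = file_path.lower()
--
--         # Check file extension
--         has_doc_extension = any(file_lower.endswith(ext) for ext in doc_extensions)
--
--         # Check for documentation patterns in filename or path
--         has_doc_pattern = any(pattern in file_lower for pattern in doc_patterns)
--
--         # Check for query-specific patterns
--         has_query_pattern = any(pattern in file_lower for pattern in query_patterns)
--
--         # Include if it matches criteria
--         if has_doc_extension or has_doc_pattern or has_query_pattern: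
--             doc_files.append(file_path)
--
--     # Sort by relevance to query
--     def file_relevance(file_path):
--         score = 0
--         file_lower = file_path.lower()
--
--         # Higher score for query-specific patterns
--         for pattern in query_patterns:
--             if pattern in file_lower:
--                 score += 3
--
--         # Medium score for general doc patterns
--         for pattern in doc_patterns:
--             if pattern in file_lower:
--                 score += 1
--
--         # Bonus for being in doc directories
--         if any(
--             dir_name in file_lower
--             for dir_name in ["doc/", "docs/", "documentation/"]
--         ):
--             score += 2
--
--         # Bonus for common important files
--         if any(
--             important in file_lower
--             for important in ["readme", "install", "changelog"]
--         ):
--             score += 2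
--
--         return score
--
--     doc_files.sort(key=file_relevance, reverse=True)
--     return doc_files
-- ===== SOURCE B (Python) =====
-- from typing import List
--
-- _DOC_EXTENSIONS = [".md", ".txt", ".rst", ".adoc", ".asciidoc", ".org", ".wiki"]
-- _DOC_PATTERNS = [
--     "readme", "install", "build", "setup", "config", "upgrade", "migration",
--     "tutorial", "guide", "manual", "howto", "faq", "changelog", "changes",
--     "news", "release", "todo", "bug", "plugin", "module", "component",
--     "api", "usage", "example",
-- ]
-- _QUERY_RULES = [
--     (["upgrade", "migration", "update"],
--      ["upgrade", "migration", "changelog", "changes", "release"]),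
--     (["plugin", "plugins", "module"],
--      ["plugin", "module", "component", "extension"]),
--     (["install", "build", "setup"],
--      ["install", "build", "setup", "configure", "compile"]),
--     (["usage", "how", "tutorial"],
--      ["usage", "tutorial", "guide", "example", "howto"]),
-- ]
--
-- def _filter_documentation_files(all_files: List[str], query: str) -> List[str]:
--     query_lower = query.lower()
--     query_patterns = []
--     for terms, patterns in _QUERY_RULES:
--         if any(t in query_lower for t in terms):
--             query_patterns.extend(patterns)
--
--     # scores are bounded: bucket sort instead of a comparison sort
--     max_score = 3 * len(query_patterns) + len(_DOC_PATTERNS) + 4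
--     buckets = [[] for _ in range(max_score + 1)]
--     for file_path in all_files:
--         fl = file_path.lower()
--         if (any(fl.endswith(ext) for ext in _DOC_EXTENSIONS)
--                 or any(p in fl for p in _DOC_PATTERNS)
--                 or any(p in fl for p in query_patterns)):
--             score = (3 * sum(p in fl for p in query_patterns)
--                      + sum(p in fl for p in _DOC_PATTERNS)
--                      + (2 if any(d in fl for d in ("doc/", "docs/", "documentation/")) else 0)
--                      + (2 if any(i in fl for i in ("readme", "install", "changelog")) else 0))
--             buckets[score].append(file_path)
--
--     out = []
--     for bucket in reversed(buckets):
--         out.extend(bucket)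
--     return out
-- ===== Notes on version B (the rewrite author's own statement) =====
-- stated objective: alternative
-- what changed: B replaces A's comparison sort with a keyed comparator by a counting/bucket sort: since the relevance score is a bounded non-negative integer, B drops each included file into a score-indexed bucket in one pass and concatenates the buckets from highest score to lowest, which reproduces Python's stable descending sort without ever comparing two files.
import Mathlib
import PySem

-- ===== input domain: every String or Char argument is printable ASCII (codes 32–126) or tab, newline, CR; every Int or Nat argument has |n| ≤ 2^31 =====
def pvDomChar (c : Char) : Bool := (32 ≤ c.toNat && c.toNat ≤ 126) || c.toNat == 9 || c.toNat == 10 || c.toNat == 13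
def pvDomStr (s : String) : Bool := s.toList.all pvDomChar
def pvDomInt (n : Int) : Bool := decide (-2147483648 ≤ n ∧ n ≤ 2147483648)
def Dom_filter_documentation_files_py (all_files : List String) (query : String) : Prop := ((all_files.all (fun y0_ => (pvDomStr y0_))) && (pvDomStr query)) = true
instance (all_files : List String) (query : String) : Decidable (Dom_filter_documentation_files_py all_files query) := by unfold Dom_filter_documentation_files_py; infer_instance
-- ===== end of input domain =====

-- B replaces A's comparison sort (keyed comparator) by a counting/bucket sort over the
-- bounded non-negative relevance scores; objective: alternative algorithm, same result.

-- ===== PORT A =====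
def pvDocExtensions : List String := [".md", ".txt", ".rst", ".adoc", ".asciidoc", ".org", ".wiki"]

def pvDocPatterns : List String :=
  ["readme", "install", "build", "setup", "config", "upgrade", "migration",
   "tutorial", "guide", "manual", "howto", "faq", "changelog", "changes",
   "news", "release", "todo", "bug", "plugin", "module", "component",
   "api", "usage", "example"]

def pvQueryPatterns (query_lower : String) : List String :=
  let qp : List String := []
  let qp := if ["upgrade", "migration", "update"].any (fun t => PySem.Str.isIn t query_lower)
            then qp ++ ["upgrade", "migration", "changelog", "changes", "release"] else qp
  let qp := if ["plugin", "plugins", "module"].any (fun t => PySem.Str.isIn t query_lower)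
            then qp ++ ["plugin", "module", "component", "extension"] else qp
  let qp := if ["install", "build", "setup"].any (fun t => PySem.Str.isIn t query_lower)
            then qp ++ ["install", "build", "setup", "configure", "compile"] else qp
  if ["usage", "how", "tutorial"].any (fun t => PySem.Str.isIn t query_lower)
  then qp ++ ["usage", "tutorial", "guide", "example", "howto"] else qp

def pvFileRelevance (query_patterns : List String) (file_path : String) : Int :=
  let file_lower := PySem.Str.lower file_path
  let score : Int := 0
  let score := query_patterns.foldl (fun s p => if PySem.Str.isIn p file_lower then s + 3 else s) score
  let score := pvDocPatterns.foldl (fun s p => if PySem.Str.isIn p file_lower then s + 1 else s) score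
  let score := if ["doc/", "docs/", "documentation/"].any (fun d => PySem.Str.isIn d file_lower)
               then score + 2 else score
  if ["readme", "install", "changelog"].any (fun i => PySem.Str.isIn i file_lower)
  then score + 2 else score

def filter_documentation_files_py (all_files : List String) (query : String) : List String :=
  let query_lower := PySem.Str.lower query
  let query_patterns := pvQueryPatterns query_lower
  let doc_files := all_files.foldl (fun acc file_path =>
    let file_lower := PySem.Str.lower file_path
    let has_doc_extension := pvDocExtensions.any (fun ext => PySem.Str.endswith file_lower ext)
    let has_doc_pattern := pvDocPatterns.any (fun p => PySem.Str.isIn p file_lower)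
    let has_query_pattern := query_patterns.any (fun p => PySem.Str.isIn p file_lower)
    if has_doc_extension || has_doc_pattern || has_query_pattern then acc ++ [file_path] else acc) []
  PySem.List.sorted doc_files (pvFileRelevance query_patterns) true

-- ===== PORT B =====
def pvQueryRules : List (List String × List String) :=
  [(["upgrade", "migration", "update"], ["upgrade", "migration", "changelog", "changes", "release"]),
   (["plugin", "plugins", "module"], ["plugin", "module", "component", "extension"]),
   (["install", "build", "setup"], ["install", "build", "setup", "configure", "compile"]),
   (["usage", "how", "tutorial"], ["usage", "tutorial", "guide", "example", "howto"])]

def pvAltScoreN (query_patterns : List String) (fl : String) : Nat :=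
  3 * query_patterns.countP (fun p => PySem.Str.isIn p fl)
  + pvDocPatterns.countP (fun p => PySem.Str.isIn p fl)
  + (if ["doc/", "docs/", "documentation/"].any (fun d => PySem.Str.isIn d fl) then 2 else 0)
  + (if ["readme", "install", "changelog"].any (fun i => PySem.Str.isIn i fl) then 2 else 0)

def filter_documentation_files_py_alt (all_files : List String) (query : String) : List String :=
  let query_lower := PySem.Str.lower query
  let query_patterns := pvQueryRules.foldl
    (fun qp r => if r.1.any (fun t => PySem.Str.isIn t query_lower) then qp ++ r.2 else qp) []
  let max_score := 3 * query_patterns.length + pvDocPatterns.length + 4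
  let buckets := all_files.foldl (fun bk file_path =>
    let fl := PySem.Str.lower file_path
    if pvDocExtensions.any (fun ext => PySem.Str.endswith fl ext)
       || pvDocPatterns.any (fun p => PySem.Str.isIn p fl)
       || query_patterns.any (fun p => PySem.Str.isIn p fl)
    then bk.modify (pvAltScoreN query_patterns fl) (fun b => b ++ [file_path]) else bk)
    (List.replicate (max_score + 1) [])
  buckets.reverse.foldl (fun out bucket => out ++ bucket) []

-- ===== PRECONDITION & SPEC =====
def Spec_filter_documentation_files_py (all_files : List String) (query : String) (out : List String) : Prop := out = filter_documentation_files_py_alt all_files query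
instance (all_files : List String) (query : String) (out : List String) : Decidable (Spec_filter_documentation_files_py all_files query out) := by unfold Spec_filter_documentation_files_py; infer_instance

-- ===== CLAIM (what is proved, stated in full; the proofs are below) =====
def Claim_equal_filter_documentation_files_py : Prop := ∀ (all_files : List String) (query : String), Dom_filter_documentation_files_py all_files query → Spec_filter_documentation_files_py all_files query (filter_documentation_files_py all_files query)

-- ===== LEMMAS AND PROOFS =====

-- B's fold over the rule table computes A's query_patterns.
theorem pv_queryPatterns_eq (ql : String) :
    pvQueryRules.foldl
      (fun qp r => if r.1.any (fun t => PySem.Str.isIn t ql) then qp ++ r.2 else qp) []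
      = pvQueryPatterns ql := by
  simp only [pvQueryRules, pvQueryPatterns, List.foldl]

-- a fold adding k for every satisfied predicate is k * countP
theorem pv_foldl_if_add (c : String → Bool) (k : Int) :
    ∀ (l : List String) (a : Int),
      l.foldl (fun s p => if c p then s + k else s) a = a + k * (l.countP c : Int)
  | [], a => by simp
  | p :: t, a => by
    by_cases h : c p <;>
      simp [List.foldl, h, pv_foldl_if_add c k t] <;> push_cast <;> ring

-- A's comparator score is the Int cast of B's Nat counting score (on the lowered path).
theorem pv_score_eq (qp : List String) (f : String) :
    pvFileRelevance qp f = (pvAltScoreN qp (PySem.Str.lower f) : Int) := by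
  simp only [pvFileRelevance, pvAltScoreN]
  rw [pv_foldl_if_add, pv_foldl_if_add]
  split_ifs <;> push_cast <;> ring

-- the counting score is bounded by 3·|qp| + |docPatterns| + 4
theorem pv_score_bound (qp : List String) (fl : String) :
    pvAltScoreN qp fl ≤ 3 * qp.length + pvDocPatterns.length + 4 := by
  unfold pvAltScoreN
  have h1 := List.countP_le_length (l := qp) (p := fun p => PySem.Str.isIn p fl)
  have h2 := List.countP_le_length (l := pvDocPatterns) (p := fun p => PySem.Str.isIn p fl)
  split_ifs <;> omega

-- the per-score segments, from score n-1 down to score 0, concatenated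
def pvDflat {α : Type} (g : α → Nat) (l : List α) : Nat → List α
  | 0 => []
  | n + 1 => l.filter (fun f => g f == n) ++ pvDflat g l n

theorem pvDflat_nil {α : Type} (g : α → Nat) : ∀ n : Nat, pvDflat g [] n = []
  | 0 => rfl
  | n + 1 => by simp [pvDflat, pvDflat_nil g n]

theorem pv_mem_dflat {α : Type} (g : α → Nat) (l : List α) :
    ∀ (n : Nat) (y : α), y ∈ pvDflat g l n → g y < n
  | 0, y, h => by simp [pvDflat] at h
  | n + 1, y, h => by
    simp only [pvDflat, List.mem_append, List.mem_filter] at h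
    rcases h with ⟨_, h⟩ | h
    · have := beq_iff_eq.mp h; omega
    · have := pv_mem_dflat g l n y h; omega

theorem pvDflat_append_high {α : Type} (g : α → Nat) (l : List α) (x : α) :
    ∀ n : Nat, n ≤ g x → pvDflat g (l ++ [x]) n = pvDflat g l n
  | 0, _ => rfl
  | n + 1, h => by
    simp only [pvDflat, List.filter_append]
    rw [pvDflat_append_high g l x n (by omega)]
    have hx : (g x == n) = false := by simp; omega
    simp [List.filter, hx]

theorem pv_insertBy_skip {α : Type} (cmp : α → α → Bool) (x : α) :
    ∀ (seg rest : List α), (∀ y ∈ seg, cmp x y = false) →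
      PySem.List.insertBy cmp x (seg ++ rest) = seg ++ PySem.List.insertBy cmp x rest
  | [], rest, _ => rfl
  | y :: t, rest, h => by
    have hy := h y (by simp)
    simp only [List.cons_append, PySem.List.insertBy, hy, Bool.false_eq_true, if_false]
    rw [pv_insertBy_skip cmp x t rest (fun z hz => h z (by simp [hz]))]

theorem pv_insertBy_front {α : Type} (cmp : α → α → Bool) (x : α) :
    ∀ (rest : List α), (∀ y ∈ rest, cmp x y = true) →
      PySem.List.insertBy cmp x rest = x :: rest
  | [], _ => rfl
  | y :: t, h => by
    have hy := h y (by simp)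
    simp [PySem.List.insertBy, hy]

-- inserting descending-by-score into the bucketed concatenation appends x at the end of its segment
theorem pv_insertBy_dflat {α : Type} (g : α → Nat) (l : List α) (x : α) :
    ∀ n : Nat, g x < n →
      PySem.List.insertBy (fun a b => decide ((g b : Int) < (g a : Int))) x (pvDflat g l n)
        = pvDflat g (l ++ [x]) n
  | 0, h => by omega
  | n + 1, h => by
    simp only [pvDflat]
    by_cases hx : g x = n
    · rw [pv_insertBy_skip _ x _ _ (by
        intro y hy
        have := (List.mem_filter.mp hy).2
        have hyn := beq_iff_eq.mp this
        simp [hyn, hx])]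
      rw [pv_insertBy_front _ x _ (by
        intro y hy
        have := pv_mem_dflat g l n y hy
        simp; omega)]
      rw [pvDflat_append_high g l x n (by omega)]
      have hfx : (g x == n) = true := by simp [hx]
      simp [List.filter_append, List.filter, hfx]
    · have hlt : g x < n := by omega
      rw [pv_insertBy_skip _ x _ _ (by
        intro y hy
        have := (List.mem_filter.mp hy).2
        have hyn := beq_iff_eq.mp this
        simp [hyn]; omega)]
      rw [pv_insertBy_dflat g l x n hlt]
      have hfx : (g x == n) = false := by simp; omega
      simp [List.filter_append, List.filter, hfx]

theorem pv_foldl_insertBy_dflat {α : Type} (g : α → Nat) (n : Nat) :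
    ∀ (xs l₀ : List α), (∀ f ∈ xs, g f < n) →
      xs.foldl (fun acc x => PySem.List.insertBy (fun a b => decide ((g b : Int) < (g a : Int))) x acc)
        (pvDflat g l₀ n) = pvDflat g (l₀ ++ xs) n
  | [], l₀, _ => by simp
  | x :: t, l₀, h => by
    rw [List.foldl_cons, pv_insertBy_dflat g l₀ x n (h x (by simp))]
    rw [pv_foldl_insertBy_dflat g n t (l₀ ++ [x]) (fun f hf => h f (by simp [hf]))]
    simp

-- Python's stable reverse sort by a bounded Nat-valued score is the bucket concatenation.
theorem pv_sorted_eq_dflat {α : Type} (g : α → Nat) (l : List α) (n : Nat)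
    (h : ∀ f ∈ l, g f < n) :
    PySem.List.sorted l (fun f => (g f : Int)) true = pvDflat g l n := by
  rw [PySem.List.sorted_rev_eq_foldl_insertBy]
  have := pv_foldl_insertBy_dflat g n l [] h
  rw [pvDflat_nil] at this
  simpa using this

-- A's append-if loop is a filter
theorem pv_foldl_filter {α : Type} (incl : α → Bool) :
    ∀ (xs acc : List α),
      xs.foldl (fun a f => if incl f then a ++ [f] else a) acc = acc ++ xs.filter incl
  | [], acc => by simp
  | x :: t, acc => by
    by_cases h : incl x <;> simp [List.foldl_cons, h, pv_foldl_filter incl t]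

-- bucket-filling preserves the number of buckets
theorem pv_buckets_length {α : Type} (incl : α → Bool) (g : α → Nat) :
    ∀ (xs : List α) (bk : List (List α)),
      (xs.foldl (fun bk f => if incl f then bk.modify (g f) (fun b => b ++ [f]) else bk) bk).length
        = bk.length
  | [], bk => rfl
  | x :: t, bk => by
    by_cases h : incl x <;> simp [List.foldl_cons, h, pv_buckets_length incl g t]

-- bucket i of the filled table holds exactly the included files of score i, in order
theorem pv_buckets_getElem {α : Type} (incl : α → Bool) (g : α → Nat) :
    ∀ (xs : List α) (bk : List (List α)) (i : Nat) (hi : i < bk.length),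
      (xs.foldl (fun bk f => if incl f then bk.modify (g f) (fun b => b ++ [f]) else bk) bk)[i]?
        = some (bk[i] ++ xs.filter (fun f => incl f && (g f == i)))
  | [], bk, i, hi => by simp [List.getElem?_eq_getElem hi]
  | x :: t, bk, i, hi => by
    by_cases h : incl x
    · rw [List.foldl_cons]
      simp only [h, if_true]
      rw [pv_buckets_getElem incl g t (bk.modify (g x) (fun b => b ++ [x])) i (by simpa using hi)]
      rw [List.getElem_modify]
      by_cases he : g x = i
      · simp [he, List.filter, h]
      · rw [if_neg he]
        have : (g x == i) = false := by simp [he]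
        simp [List.filter, h, this]
    · rw [List.foldl_cons, if_neg h]
      rw [pv_buckets_getElem incl g t bk i hi]
      have : (incl x && (g x == i)) = false := by simp [h]
      simp [List.filter, this]

-- the filled bucket table, as a range-indexed map
theorem pv_buckets_eq {α : Type} (incl : α → Bool) (g : α → Nat) (xs : List α) (M : Nat) :
    xs.foldl (fun bk f => if incl f then bk.modify (g f) (fun b => b ++ [f]) else bk)
        (List.replicate M ([] : List α))
      = (List.range M).map (fun s => xs.filter (fun f => incl f && (g f == s))) := by
  apply List.ext_getElem?
  intro i
  by_cases hi : i < M
  · rw [pv_buckets_getElem incl g xs _ i (by simpa using hi)]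
    simp [hi]
  · rw [List.getElem?_eq_none (by rw [pv_buckets_length]; simpa using (not_lt.mp hi))]
    rw [List.getElem?_eq_none (by simpa using (not_lt.mp hi))]

-- concatenating the buckets from the top score down is the segment concatenation
theorem pv_flatten_rev_range_map {α : Type} (g : α → Nat) (l : List α) :
    ∀ n : Nat,
      (((List.range n).map (fun s => l.filter (fun f => g f == s))).reverse).flatten
        = pvDflat g l n
  | 0 => rfl
  | n + 1 => by
    rw [List.range_succ]
    simp only [List.map_append, List.reverse_append, List.map_cons, List.map_nil, pvDflat]
    simp [pv_flatten_rev_range_map g l n]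

-- the output loop appending each bucket is flatten
theorem pv_foldl_append_flatten {α : Type} :
    ∀ (l : List (List α)) (a : List α), l.foldl (fun out b => out ++ b) a = a ++ l.flatten
  | [], a => by simp
  | x :: t, a => by simp [List.foldl_cons, pv_foldl_append_flatten t (a ++ x)]

theorem pv_main_eq (all_files : List String) (query : String) :
    filter_documentation_files_py_alt all_files query
      = filter_documentation_files_py all_files query := by
  simp only [filter_documentation_files_py, filter_documentation_files_py_alt,
    pv_queryPatterns_eq]
  set ql := PySem.Str.lower query
  set qp := pvQueryPatterns ql with hqp
  set incl : String → Bool := fun f =>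
    pvDocExtensions.any (fun ext => PySem.Str.endswith (PySem.Str.lower f) ext)
    || pvDocPatterns.any (fun p => PySem.Str.isIn p (PySem.Str.lower f))
    || qp.any (fun p => PySem.Str.isIn p (PySem.Str.lower f)) with hincl
  set g : String → Nat := fun f => pvAltScoreN qp (PySem.Str.lower f) with hg
  set M : Nat := 3 * qp.length + pvDocPatterns.length + 4 + 1 with hM
  -- B side
  rw [show (fun (bk : List (List String)) (file_path : String) =>
        if incl file_path
        then bk.modify (pvAltScoreN qp (PySem.Str.lower file_path)) (fun b => b ++ [file_path])
        else bk)
      = fun bk f => if incl f then bk.modify (g f) (fun b => b ++ [f]) else bk from rfl]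
  rw [pv_buckets_eq incl g all_files M]
  have hseg : ∀ s : Nat,
      all_files.filter (fun f => incl f && (g f == s))
        = (all_files.filter incl).filter (fun f => g f == s) := by
    intro s
    rw [List.filter_filter]
    apply List.filter_congr
    intro f _
    simp [Bool.and_comm]
  simp only [hseg]
  rw [pv_foldl_append_flatten, List.nil_append, pv_flatten_rev_range_map g (all_files.filter incl) M]
  -- A side
  rw [pv_foldl_filter incl all_files []]
  rw [List.nil_append]
  have hkey : pvFileRelevance qp = fun f => (g f : Int) := by
    funext f; rw [hg, pv_score_eq]
  rw [hkey]
  rw [pv_sorted_eq_dflat g (all_files.filter incl) M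
    (fun f _ => by
      have := pv_score_bound qp (PySem.Str.lower f)
      simp only [hg, hM]; omega)]

-- ===== VERDICT (by name: the statement is the Claim_ definition above) =====
theorem filter_documentation_files_py_spec : Claim_equal_filter_documentation_files_py := by
  intro all_files query _
  unfold Spec_filter_documentation_files_py
  exact (pv_main_eq all_files query).symm
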